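-- pv_equiv track=rewrite | github.com/Jihyeok11/Algorithm | Python/코테/2021 농심NDS 인턴/2.py | go
-- ===== SOURCE A (Python) =====
-- dy = [-1,-1,1,1]
--
-- dx = [-1,1,-1,1]
--
-- def go(y, x, chess, cnt):
--     if chess[y][x]:
--         chess[y][x] = False
--         cnt += 1
--     for i in range(4):
--         checkY = y + dy[i]
--         checkX = x + dx[i]
--         while True:
--             if 0<= checkY < 8 and 0 <= checkX < 8:
--                 if chess[checkY][checkX]:
--                     chess[checkY][checkX] = False
--                     cnt += 1
--                 checkY += dy[i]
--                 checkX += dx[i]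
--             else:
--                 break
--     return cnt
-- ===== SOURCE B (Python) =====
-- def go(y, x, chess, cnt):
--     def sweep(i, j, s, t):
--         if not (0 <= i < 8 and 0 <= j < 8):
--             return 0
--         hit = 1 if chess[i][j] else 0
--         chess[i][j] = False
--         return hit + sweep(i + s, j + t, s, t)
--     start = 0
--     if chess[y][x]:
--         chess[y][x] = False
--         start = 1
--     return cnt + start + sum(sweep(y + s, x + t, s, t) for s in (-1, 1) for t in (-1, 1))
-- ===== Notes on version B (the rewrite author's own statement) =====
-- stated objective: alternative
-- what changed: Replaces A's while-True walks that mutate a shared cnt accumulator and index parallel dy/dx direction tables by a recursive sweep that returns each ray's hit count (clearing cells unconditionally), with the four directions generated by nested iteration over (-1, 1) and the per-ray counts summed into the result.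
import Mathlib
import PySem

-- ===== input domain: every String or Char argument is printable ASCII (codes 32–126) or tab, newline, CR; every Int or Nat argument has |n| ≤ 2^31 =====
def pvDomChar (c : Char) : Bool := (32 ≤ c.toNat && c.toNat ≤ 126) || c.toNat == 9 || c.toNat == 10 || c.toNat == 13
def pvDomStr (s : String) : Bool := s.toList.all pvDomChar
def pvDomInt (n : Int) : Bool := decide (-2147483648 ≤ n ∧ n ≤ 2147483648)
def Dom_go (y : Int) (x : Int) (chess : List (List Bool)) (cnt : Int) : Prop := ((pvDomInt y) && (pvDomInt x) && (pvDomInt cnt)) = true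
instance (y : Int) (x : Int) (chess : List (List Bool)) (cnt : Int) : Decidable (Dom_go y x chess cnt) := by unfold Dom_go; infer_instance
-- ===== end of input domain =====

-- B replaces A's accumulator-mutating while-walks (dy/dx direction tables, break on leaving
-- the board) by a recursive sweep that returns each ray's count, summed over direction pairs
-- generated by nested iteration; equivalence is proved for the RETURN value (both Pythons
-- also leave the mutable chess argument in the same state).

-- ===== PORT A =====
def dyL : List Int := [-1, -1, 1, 1]
def dxL : List Int := [-1, 1, -1, 1]

-- chess[i][j] as a Bool read (Python raises on a missing cell; Pre_go keeps every read valid)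
def getCell (chess : List (List Bool)) (i j : Int) : Bool :=
  PySem.List.pyGetD (PySem.List.pyGetD chess i []) j false

-- chess[i][j] = False
def clearAt (chess : List (List Bool)) (i j : Int) : List (List Bool) :=
  PySem.List.pySetD chess i (PySem.List.pySetD (PySem.List.pyGetD chess i []) j false)

-- A's 'while True' walk along one ray; the in-range coordinate moves by ±1 every iteration, so
-- the loop hits its break after at most 9 iterations: fuel 16 is never exhausted
def rayLoop : Nat → Int → Int → Int → Int → List (List Bool) × Int → List (List Bool) × Int
  | 0, _, _, _, _, st => st
  | fuel+1, s, t, cy, cx, (chess, cnt) =>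
    if 0 ≤ cy ∧ cy < 8 ∧ 0 ≤ cx ∧ cx < 8 then
      if getCell chess cy cx then
        rayLoop fuel s t (cy + s) (cx + t) (clearAt chess cy cx, cnt + 1)
      else
        rayLoop fuel s t (cy + s) (cx + t) (chess, cnt)
    else (chess, cnt)

def go (y : Int) (x : Int) (chess : List (List Bool)) (cnt : Int) : Int :=
  let st0 : List (List Bool) × Int :=
    if getCell chess y x then (clearAt chess y x, cnt + 1) else (chess, cnt)
  ((PySem.List.pyRange 0 4 1).foldl
    (fun st i =>
      let s := PySem.List.pyGetD dyL i 0
      let t := PySem.List.pyGetD dxL i 0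
      rayLoop 16 s t (y + s) (x + t) st) st0).2

-- ===== PORT B =====
-- B's recursive sweep: clears the cell unconditionally and returns 1 for a hit plus the count
-- of the rest of the ray, together with the board it leaves behind (fuel 16, as for rayLoop)
def sweepL : Nat → Int → Int → Int → Int → List (List Bool) → Int × List (List Bool)
  | 0, _, _, _, _, g => (0, g)
  | fuel+1, i, j, s, t, g =>
    if 0 ≤ i ∧ i < 8 ∧ 0 ≤ j ∧ j < 8 then
      ((if getCell g i j then 1 else 0) + (sweepL fuel (i + s) (j + t) s t (clearAt g i j)).1,
       (sweepL fuel (i + s) (j + t) s t (clearAt g i j)).2)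
    else (0, g)

-- the direction pairs (s, t) for s in (-1, 1) for t in (-1, 1)
def dirsB : List (Int × Int) :=
  [(-1 : Int), 1].flatMap (fun s => [(-1 : Int), 1].map (fun t => (s, t)))

def go_alt (y : Int) (x : Int) (chess : List (List Bool)) (cnt : Int) : Int :=
  let st0 : List (List Bool) × Int :=
    if getCell chess y x then (clearAt chess y x, cnt + 1) else (chess, cnt)
  (dirsB.foldl
    (fun st d =>
      ((sweepL 16 (y + d.1) (x + d.2) d.1 d.2 st.1).2,
       st.2 + (sweepL 16 (y + d.1) (x + d.2) d.1 d.2 st.1).1)) st0).2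

-- ===== PRECONDITION & SPEC =====
-- Pre_go is exactly the set of inputs on which A returns (no IndexError): the start square
-- exists (Python wrap-around indexing included) and every in-board cell on the four reachable
-- diagonal ray prefixes exists.
def Pre_go (y : Int) (x : Int) (chess : List (List Bool)) (cnt : Int) : Prop :=
  PySem.Raise.InRange chess.length y
  ∧ PySem.Raise.InRange ((PySem.List.pyGet? chess y).getD []).length x
  ∧ ∀ s ∈ [(-1 : Int), 1], ∀ t ∈ [(-1 : Int), 1],
      (0 ≤ y + s ∧ y + s < 8 ∧ 0 ≤ x + t ∧ x + t < 8) →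
      ∀ k ∈ List.range 9, 1 ≤ k →
        (k : Int) ≤ min (if 0 < s then 7 - y else y) (if 0 < t then 7 - x else x) →
        (y + k * s).toNat < chess.length
          ∧ (x + k * t).toNat < (chess.getD (y + k * s).toNat []).length
instance (y : Int) (x : Int) (chess : List (List Bool)) (cnt : Int) : Decidable (Pre_go y x chess cnt) := by unfold Pre_go; infer_instance

def pvWitness_go : Int × Int × List (List Bool) × Int :=
  (0, 0, List.replicate 8 (List.replicate 8 true), 0)

def Spec_go (y : Int) (x : Int) (chess : List (List Bool)) (cnt : Int) (out : Int) : Prop := out = go_alt y x chess cnt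
instance (y : Int) (x : Int) (chess : List (List Bool)) (cnt : Int) (out : Int) : Decidable (Spec_go y x chess cnt out) := by unfold Spec_go; infer_instance

-- ===== CLAIM (what is proved, stated in full; the proofs are below) =====
def Claim_equal_go : Prop := ∀ (y : Int) (x : Int) (chess : List (List Bool)) (cnt : Int), Dom_go y x chess cnt → Pre_go y x chess cnt → Spec_go y x chess cnt (go y x chess cnt)

-- ===== LEMMAS AND PROOFS =====

-- the board positions A's while-loop visits along one ray
def rayPos : Nat → Int → Int → Int → Int → List (Int × Int)
  | 0, _, _, _, _ => []
  | f+1, s, t, cy, cx =>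
    if 0 ≤ cy ∧ cy < 8 ∧ 0 ≤ cx ∧ cx < 8 then (cy, cx) :: rayPos f s t (cy + s) (cx + t) else []

-- visiting a list of positions as A does: test, clear if set, count
def visit (ps : List (Int × Int)) (st : List (List Bool) × Int) : List (List Bool) × Int :=
  ps.foldl (fun st p => if getCell st.1 p.1 p.2 then (clearAt st.1 p.1 p.2, st.2 + 1) else st) st

-- visiting a list of positions as B does: clear unconditionally, count the hits
def visitU (ps : List (Int × Int)) (st : List (List Bool) × Int) : List (List Bool) × Int :=
  ps.foldl
    (fun st p =>
      (clearAt st.1 p.1 p.2, if getCell st.1 p.1 p.2 then st.2 + 1 else st.2)) st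

-- all positions A touches, in A's order
def posA (y x : Int) : List (Int × Int) :=
  (y, x) :: (rayPos 16 (-1) (-1) (y - 1) (x - 1) ++ rayPos 16 (-1) 1 (y - 1) (x + 1)
    ++ rayPos 16 1 (-1) (y + 1) (x - 1) ++ rayPos 16 1 1 (y + 1) (x + 1))

-- a position readable and writable on the board
def Valid (g : List (List Bool)) (p : Int × Int) : Prop :=
  0 ≤ p.1 ∧ p.1.toNat < g.length ∧ 0 ≤ p.2 ∧ p.2.toNat < (g.getD p.1.toNat []).length

theorem visit_cons (a b : Int) (ps : List (Int × Int)) (st : List (List Bool) × Int) :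
    visit ((a, b) :: ps) st
      = visit ps (if getCell st.1 a b then (clearAt st.1 a b, st.2 + 1) else st) := rfl

theorem visitU_cons (a b : Int) (ps : List (Int × Int)) (st : List (List Bool) × Int) :
    visitU ((a, b) :: ps) st
      = visitU ps (clearAt st.1 a b, if getCell st.1 a b then st.2 + 1 else st.2) := rfl

theorem visit_append (a b : List (Int × Int)) (st : List (List Bool) × Int) :
    visit (a ++ b) st = visit b (visit a st) := by
  simp [visit, List.foldl_append]

theorem visitU_append (a b : List (Int × Int)) (st : List (List Bool) × Int) :
    visitU (a ++ b) st = visitU b (visitU a st) := by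
  simp [visitU, List.foldl_append]

theorem rayLoop_eq_visit (f : Nat) (s t cy cx : Int) (st : List (List Bool) × Int) :
    rayLoop f s t cy cx st = visit (rayPos f s t cy cx) st := by
  induction f generalizing cy cx st with
  | zero => obtain ⟨g, n⟩ := st; rfl
  | succ f ih =>
    obtain ⟨g, n⟩ := st
    by_cases hin : 0 ≤ cy ∧ cy < 8 ∧ 0 ≤ cx ∧ cx < 8
    · by_cases hc : getCell g cy cx <;>
        simp only [rayLoop, rayPos, if_pos hin, hc, visit, List.foldl_cons, if_true, if_false,
          Bool.false_eq_true] <;>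
      exact ih _ _ _
    · simp [rayLoop, rayPos, if_neg hin, visit]

theorem sweep_eq_visitU (f : Nat) (s t i j : Int) (g : List (List Bool)) (c : Int) :
    visitU (rayPos f s t i j) (g, c)
      = ((sweepL f i j s t g).2, c + (sweepL f i j s t g).1) := by
  induction f generalizing i j g c with
  | zero => simp [rayPos, sweepL, visitU]
  | succ f ih =>
    by_cases hin : 0 ≤ i ∧ i < 8 ∧ 0 ≤ j ∧ j < 8
    · rw [show rayPos (f + 1) s t i j = (i, j) :: rayPos f s t (i + s) (j + t) from by
        simp [rayPos, hin]]
      rw [visitU_cons, ih, show sweepL (f + 1) i j s t g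
          = ((if getCell g i j then 1 else 0) + (sweepL f (i + s) (j + t) s t (clearAt g i j)).1,
             (sweepL f (i + s) (j + t) s t (clearAt g i j)).2) from by
        simp [sweepL, hin]]
      by_cases hc : getCell g i j <;> simp [hc] <;> ring
    · simp [rayPos, sweepL, if_neg hin, visitU]

theorem go_eq_visit (y x : Int) (chess : List (List Bool)) (cnt : Int) :
    go y x chess cnt = (visit (posA y x) (chess, cnt)).2 := by
  have hr : PySem.List.pyRange 0 4 1 = [0, 1, 2, 3] := by decide
  unfold go posA
  rw [hr]
  simp only [List.foldl_cons, List.foldl_nil,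
    show PySem.List.pyGetD dyL 0 0 = -1 from by decide,
    show PySem.List.pyGetD dyL 1 0 = -1 from by decide,
    show PySem.List.pyGetD dyL 2 0 = 1 from by decide,
    show PySem.List.pyGetD dyL 3 0 = 1 from by decide,
    show PySem.List.pyGetD dxL 0 0 = -1 from by decide,
    show PySem.List.pyGetD dxL 1 0 = 1 from by decide,
    show PySem.List.pyGetD dxL 2 0 = -1 from by decide,
    show PySem.List.pyGetD dxL 3 0 = 1 from by decide,
    rayLoop_eq_visit]
  rw [show (y : Int) + -1 = y - 1 from by ring, show (x : Int) + -1 = x - 1 from by ring]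
  rw [show ((y, x) : Int × Int) :: (rayPos 16 (-1) (-1) (y - 1) (x - 1)
      ++ rayPos 16 (-1) 1 (y - 1) (x + 1) ++ rayPos 16 1 (-1) (y + 1) (x - 1)
      ++ rayPos 16 1 1 (y + 1) (x + 1))
    = (([(y, x)] ++ rayPos 16 (-1) (-1) (y - 1) (x - 1)) ++ rayPos 16 (-1) 1 (y - 1) (x + 1)
      ++ rayPos 16 1 (-1) (y + 1) (x - 1)) ++ rayPos 16 1 1 (y + 1) (x + 1) from by simp]
  rw [visit_append, visit_append, visit_append, visit_append]
  by_cases hc : getCell chess y x <;> simp [visit, hc]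

theorem go_alt_eq_visitU (y x : Int) (chess : List (List Bool)) (cnt : Int) :
    go_alt y x chess cnt
      = (visitU (rayPos 16 (-1) (-1) (y - 1) (x - 1) ++ rayPos 16 (-1) 1 (y - 1) (x + 1)
            ++ rayPos 16 1 (-1) (y + 1) (x - 1) ++ rayPos 16 1 1 (y + 1) (x + 1))
          (if getCell chess y x then (clearAt chess y x, cnt + 1) else (chess, cnt))).2 := by
  have hd : dirsB = [(-1, -1), (-1, 1), (1, -1), (1, 1)] := by decide
  have hstep : (fun (st : List (List Bool) × Int) (d : Int × Int) =>
      ((sweepL 16 (y + d.1) (x + d.2) d.1 d.2 st.1).2,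
       st.2 + (sweepL 16 (y + d.1) (x + d.2) d.1 d.2 st.1).1))
      = fun st d => visitU (rayPos 16 d.1 d.2 (y + d.1) (x + d.2)) st := by
    funext st d
    obtain ⟨g, c⟩ := st
    rw [sweep_eq_visitU]
  unfold go_alt
  rw [hd, hstep]
  simp only [List.foldl_cons, List.foldl_nil]
  rw [visitU_append, visitU_append, visitU_append]
  rw [show (y : Int) + -1 = y - 1 from by ring, show (x : Int) + -1 = x - 1 from by ring]

-- under nonnegative indices, clearing is List.set on both levels
theorem clearAt_eq (g : List (List Bool)) (a b : Int) (ha : 0 ≤ a) (hb : 0 ≤ b) :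
    clearAt g a b = g.set a.toNat ((g.getD a.toNat []).set b.toNat false) := by
  rw [clearAt, PySem.List.pyGetD_of_nonneg _ _ ha,
    PySem.List.pySetD_of_nonneg _ _ hb, PySem.List.pySetD_of_nonneg _ _ ha]

theorem getCell_eq (g : List (List Bool)) (i j : Int) (hi : 0 ≤ i) (hj : 0 ≤ j) :
    getCell g i j = (g.getD i.toNat []).getD j.toNat false := by
  rw [getCell, PySem.List.pyGetD_of_nonneg _ _ hi, PySem.List.pyGetD_of_nonneg _ _ hj]

-- clearing never changes the board's shape, whatever the (possibly wrapping) indices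
theorem length_clearAt (g : List (List Bool)) (a b : Int) :
    (clearAt g a b).length = g.length := by
  rw [clearAt, PySem.List.length_pySetD]

theorem getD_length_clearAt (g : List (List Bool)) (a b : Int) (i : Nat) :
    ((clearAt g a b).getD i []).length = (g.getD i []).length := by
  rw [clearAt]
  have hlenrow : (PySem.List.pySetD (PySem.List.pyGetD g a []) b false).length
      = (PySem.List.pyGetD g a []).length := PySem.List.length_pySetD _ _ _
  set row' := PySem.List.pySetD (PySem.List.pyGetD g a []) b false with hrowdef
  unfold PySem.List.pySetD PySem.List.pySet?
  rcases hk : PySem.List.pyIdx? g.length a with _ | k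
  · simp
  · have hklt : k < g.length := by
      unfold PySem.List.pyIdx? at hk
      split_ifs at hk <;> simp_all <;> omega
    have hrow : PySem.List.pyGetD g a [] = g[k] := by
      unfold PySem.List.pyGetD PySem.List.pyGet?
      rw [hk]
      simp [List.getElem?_eq_getElem hklt]
    simp only [Option.map_some, Option.getD_some]
    by_cases hik : k = i
    · subst hik
      simp [List.getD_eq_getElem?_getD, List.getElem?_set, hklt, hlenrow, hrow,
        List.getElem?_eq_getElem hklt]
    · simp [List.getD_eq_getElem?_getD, List.getElem?_set, hik]

-- a clear keeps every position valid
theorem valid_clearAt (g : List (List Bool)) (a b : Int)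
    (p : Int × Int) (hp : Valid g p) : Valid (clearAt g a b) p := by
  obtain ⟨h1, h2, h3, h4⟩ := hp
  refine ⟨h1, ?_, h3, ?_⟩
  · rw [length_clearAt]; exact h2
  · rw [getD_length_clearAt]; exact h4

-- clearing an already-empty valid cell does nothing
theorem clearAt_noop (g : List (List Bool)) (a b : Int) (hv : Valid g (a, b))
    (hc : getCell g a b = false) : clearAt g a b = g := by
  obtain ⟨h1, h2, h3, h4⟩ := hv
  rw [clearAt_eq g a b h1 h3]
  have hrow : g.getD a.toNat [] = g[a.toNat] := by
    rw [List.getD_eq_getElem?_getD, List.getElem?_eq_getElem h2]; rfl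
  have hcell : (g.getD a.toNat [])[b.toNat] = false := by
    rw [getCell_eq g a b h1 h3, List.getD_eq_getElem?_getD,
      List.getElem?_eq_getElem (by simpa using h4)] at hc
    simpa using hc
  rw [show (g.getD a.toNat []).set b.toNat false
      = (g.getD a.toNat []).set b.toNat (g.getD a.toNat [])[b.toNat] from by rw [hcell],
    List.set_getElem_self (by simpa using h4), hrow, List.set_getElem_self h2]

-- on valid positions B's unconditional clear agrees with A's conditional one
theorem visitU_eq_visit (ps : List (Int × Int)) (g : List (List Bool)) (c : Int)
    (hv : ∀ p ∈ ps, Valid g p) : visitU ps (g, c) = visit ps (g, c) := by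
  induction ps generalizing g c with
  | nil => rfl
  | cons p rest ih =>
    obtain ⟨a, b⟩ := p
    have hva := hv (a, b) List.mem_cons_self
    have hrest : ∀ q ∈ rest, Valid (clearAt g a b) q :=
      fun q hq => valid_clearAt g a b q (hv q (List.mem_cons_of_mem _ hq))
    rw [visitU_cons, visit_cons]
    by_cases hc : getCell g a b
    · rw [if_pos hc, if_pos hc, ih _ _ hrest]
    · rw [if_neg hc, if_neg hc,
        clearAt_noop g a b hva (Bool.not_eq_true _ ▸ hc), ih _ _ (by
          rw [← clearAt_noop g a b hva (Bool.not_eq_true _ ▸ hc)] at hv ⊢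
          exact fun q hq => hv q (List.mem_cons_of_mem _ hq))]

theorem rayPos_nil (f : Nat) (s t cy cx : Int)
    (hout : ¬(0 ≤ cy ∧ cy < 8 ∧ 0 ≤ cx ∧ cx < 8)) : rayPos f s t cy cx = [] := by
  cases f with
  | zero => rfl
  | succ f => simp [rayPos, hout]

theorem rayPos_arith (s t : Int) (hs : s = 1 ∨ s = -1) (ht : t = 1 ∨ t = -1) (y x : Int)
    (f : Nat) (k0 : Int) (hk0 : 1 ≤ k0)
    (hin : 0 ≤ y + k0 * s ∧ y + k0 * s < 8 ∧ 0 ≤ x + k0 * t ∧ x + k0 * t < 8)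
    (hf : min (if 0 < s then 7 - y else y) (if 0 < t then 7 - x else x) + 1 ≤ k0 + f) :
    rayPos f s t (y + k0 * s) (x + k0 * t)
      = (PySem.List.pyRange k0
          (min (if 0 < s then 7 - y else y) (if 0 < t then 7 - x else x) + 1) 1).map
          (fun k => (y + k * s, x + k * t)) := by
  induction f generalizing k0 with
  | zero =>
    exfalso
    rcases hs with rfl | rfl <;> rcases ht with rfl | rfl <;>
      (norm_num at hin hf; omega)
  | succ f ih =>
    have hreach : k0 ≤ min (if 0 < s then 7 - y else y) (if 0 < t then 7 - x else x) := by
      rcases hs with rfl | rfl <;> rcases ht with rfl | rfl <;>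
        (norm_num at hin ⊢; omega)
    rw [show rayPos (f + 1) s t (y + k0 * s) (x + k0 * t)
        = (y + k0 * s, x + k0 * t) :: rayPos f s t (y + k0 * s + s) (x + k0 * t + t) from by
      simp [rayPos, hin]]
    rw [PySem.List.pyRange_one_cons (by omega), List.map_cons]
    congr 1
    have hstep : y + k0 * s + s = y + (k0 + 1) * s := by ring
    have hstep' : x + k0 * t + t = x + (k0 + 1) * t := by ring
    rw [hstep, hstep']
    by_cases hin' : 0 ≤ y + (k0 + 1) * s ∧ y + (k0 + 1) * s < 8 ∧ 0 ≤ x + (k0 + 1) * t ∧ x + (k0 + 1) * t < 8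
    · exact ih (k0 + 1) (by omega) hin' (by omega)
    · have hend : min (if 0 < s then 7 - y else y) (if 0 < t then 7 - x else x) + 1 ≤ k0 + 1 := by
        rcases hs with rfl | rfl <;> rcases ht with rfl | rfl <;> simp_all <;> omega
      rw [rayPos_nil f s t _ _ hin', PySem.List.pyRange_one_eq_nil (by omega)]
      rfl

-- every position a ray visits is a cell Pre_go guarantees to exist
theorem ray_valid (y x : Int) (chess : List (List Bool))
    (hpre : ∀ s ∈ [(-1 : Int), 1], ∀ t ∈ [(-1 : Int), 1],
      (0 ≤ y + s ∧ y + s < 8 ∧ 0 ≤ x + t ∧ x + t < 8) →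
      ∀ k ∈ List.range 9, 1 ≤ k →
        (k : Int) ≤ min (if 0 < s then 7 - y else y) (if 0 < t then 7 - x else x) →
        (y + k * s).toNat < chess.length
          ∧ (x + k * t).toNat < (chess.getD (y + k * s).toNat []).length)
    (s t : Int) (hs : s = 1 ∨ s = -1) (ht : t = 1 ∨ t = -1) :
    ∀ p ∈ rayPos 16 s t (y + s) (x + t), Valid chess p := by
  intro p hp
  by_cases hg : 0 ≤ y + s ∧ y + s < 8 ∧ 0 ≤ x + t ∧ x + t < 8
  · rw [show (y : Int) + s = y + 1 * s from by ring, show (x : Int) + t = x + 1 * t from by ring]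
      at hp
    rw [rayPos_arith s t hs ht y x 16 1 le_rfl
      (by rw [show y + 1 * s = y + s from by ring, show x + 1 * t = x + t from by ring]; exact hg)
      (by rcases hs with rfl | rfl <;> rcases ht with rfl | rfl <;> (norm_num at hg ⊢; omega))]
      at hp
    rw [List.mem_map] at hp
    obtain ⟨k, hkmem, rfl⟩ := hp
    rw [PySem.List.mem_pyRange_one] at hkmem
    have hk1 : 1 ≤ k := hkmem.1
    have hkK : k ≤ min (if 0 < s then 7 - y else y) (if 0 < t then 7 - x else x) := by omega
    have hk8 : k ≤ 8 := by
      rcases hs with rfl | rfl <;> rcases ht with rfl | rfl <;> (norm_num at hg hkK ⊢; omega)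
    have hcast : ((k.toNat : Int)) = k := Int.toNat_of_nonneg (by omega)
    have := hpre s (by rcases hs with rfl | rfl <;> simp) t
      (by rcases ht with rfl | rfl <;> simp) hg k.toNat
      (List.mem_range.mpr (by omega)) (by omega) (by rw [hcast]; exact hkK)
    rw [hcast] at this
    refine ⟨?_, this.1, ?_, this.2⟩
    · rcases hs with rfl | rfl <;> (norm_num at hg hkK ⊢; omega)
    · rcases ht with rfl | rfl <;> (norm_num at hg hkK ⊢; omega)
  · rw [rayPos_nil 16 s t _ _ hg] at hp
    exact absurd hp (List.not_mem_nil)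

-- ===== VERDICT (by name: the statement is the Claim_ definition above) =====
theorem go_spec : Claim_equal_go := by
  intro y x chess cnt _hdom hpre
  obtain ⟨_hy, _hx, hray⟩ := hpre
  unfold Spec_go
  rw [go_eq_visit, go_alt_eq_visitU, posA, visit_cons]
  set st0 := if getCell chess y x then (clearAt chess y x, cnt + 1) else (chess, cnt) with hst0
  have hv1 := ray_valid y x chess hray (-1) (-1) (Or.inr rfl) (Or.inr rfl)
  have hv2 := ray_valid y x chess hray (-1) 1 (Or.inr rfl) (Or.inl rfl)
  have hv3 := ray_valid y x chess hray 1 (-1) (Or.inl rfl) (Or.inr rfl)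
  have hv4 := ray_valid y x chess hray 1 1 (Or.inl rfl) (Or.inl rfl)
  rw [show (y : Int) + -1 = y - 1 from by ring] at hv1 hv2
  rw [show (x : Int) + -1 = x - 1 from by ring] at hv1 hv3
  have hvall : ∀ p ∈ rayPos 16 (-1) (-1) (y - 1) (x - 1) ++ rayPos 16 (-1) 1 (y - 1) (x + 1)
      ++ rayPos 16 1 (-1) (y + 1) (x - 1) ++ rayPos 16 1 1 (y + 1) (x + 1),
      Valid st0.1 p := by
    intro p hp
    have hvchess : Valid chess p := by
      simp only [List.mem_append] at hp
      rcases hp with ((hp | hp) | hp) | hp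
      · exact hv1 p hp
      · exact hv2 p hp
      · exact hv3 p hp
      · exact hv4 p hp
    rw [hst0]
    by_cases hc : getCell chess y x
    · rw [if_pos hc]
      exact valid_clearAt chess y x p hvchess
    · rw [if_neg hc]
      exact hvchess
  obtain ⟨g0, c0⟩ := st0
  rw [visitU_eq_visit _ _ _ hvall]
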